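-- pv_equiv track=rewrite | github.com/ISCAS007/torchseg | torchseg/models/motionseg/motionseg_base_class.py | get_aux_input_channel
-- ===== SOURCE A (Python) =====
-- def get_aux_input_channel(aux_input_format):
--     aux_in_channels=0
--     for c in aux_input_format:
--         if c.lower()=='b':
--             assert False
--             # background image
--             aux_in_channels+=3
--         elif c.lower()=='o':
--             # optical flow
--             aux_in_channels+=2
--         elif c.lower()=='n':
--             # neighbor image
--             aux_in_channels+=3
--         elif c.lower()=='-':
--             pass
--         elif c.lower()=='g':
--             # neighbor groundtruth
--             aux_in_channels+=1
--         else: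
--             assert False
--
--     return aux_in_channels
-- ===== SOURCE B (Python) =====
-- def get_aux_input_channel(aux_input_format):
--     # Lowercase once, check validity once, then compute a closed-form weighted sum of counts.
--     low = [c.lower() for c in aux_input_format]
--     assert set(low) <= {'o', 'n', 'g', '-'}
--     return 2 * low.count('o') + 3 * low.count('n') + low.count('g')
-- ===== Notes on version B (the rewrite author's own statement) =====
-- stated objective: simpler
-- what changed: Replaces the per-character if/elif accumulation with a single lowercase pass, a one-shot validity check, and a closed-form weighted sum of character counts (2*count('o') + 3*count('n') + count('g')).
import Mathlib
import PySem

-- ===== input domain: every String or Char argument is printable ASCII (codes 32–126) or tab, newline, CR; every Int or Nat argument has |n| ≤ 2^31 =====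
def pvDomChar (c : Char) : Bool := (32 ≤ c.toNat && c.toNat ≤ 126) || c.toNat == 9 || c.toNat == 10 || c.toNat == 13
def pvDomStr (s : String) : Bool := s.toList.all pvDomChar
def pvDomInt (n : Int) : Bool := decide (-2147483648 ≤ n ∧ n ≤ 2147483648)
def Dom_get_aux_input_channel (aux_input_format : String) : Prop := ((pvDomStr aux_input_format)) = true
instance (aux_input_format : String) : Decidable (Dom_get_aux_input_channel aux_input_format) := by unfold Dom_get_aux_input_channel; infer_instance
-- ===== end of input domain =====

-- B replaces A's per-character if/elif accumulation by a lowercase pass plus a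
-- closed-form weighted sum of character counts (objective: simpler).

-- ===== PORT A =====
-- c.lower() for a single char: exact on the ASCII domain (Dom) these theorems cover.
def pvLower (c : Char) : Char :=
  if 'A' ≤ c ∧ c ≤ 'Z' then Char.ofNat (c.toNat + 32) else c

def get_aux_input_channel (aux_input_format : String) : Int :=
  aux_input_format.toList.foldl (fun acc c =>
    if pvLower c = 'b' then acc            -- assert False: Python raises here (outside Pre_)
    else if pvLower c = 'o' then acc + 2
    else if pvLower c = 'n' then acc + 3
    else if pvLower c = '-' then acc
    else if pvLower c = 'g' then acc + 1
    else acc                               -- assert False: Python raises here (outside Pre_)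
  ) 0

-- ===== PORT B =====
def get_aux_input_channel_alt (aux_input_format : String) : Int :=
  let low := aux_input_format.toList.map pvLower
  2 * (PySem.List.count low 'o' : Int)
    + 3 * (PySem.List.count low 'n' : Int)
    + (PySem.List.count low 'g' : Int)

-- ===== PRECONDITION & SPEC =====
-- Pre_ excludes exactly the strings on which A's asserts fire (AssertionError):
-- any character whose lowercase is not one of 'o','n','g','-'.
def Pre_get_aux_input_channel (aux_input_format : String) : Prop :=
  aux_input_format.toList.all
    (fun c => c ∈ ['o','n','g','-','O','N','G']) = true
instance (aux_input_format : String) : Decidable (Pre_get_aux_input_channel aux_input_format) := by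
  unfold Pre_get_aux_input_channel; infer_instance

def pvWitness_get_aux_input_channel : String := "onG-"

def Spec_get_aux_input_channel (aux_input_format : String) (out : Int) : Prop := out = get_aux_input_channel_alt aux_input_format
instance (aux_input_format : String) (out : Int) : Decidable (Spec_get_aux_input_channel aux_input_format out) := by unfold Spec_get_aux_input_channel; infer_instance

-- ===== CLAIM (what is proved, stated in full; the proofs are below) =====
def Claim_equal_get_aux_input_channel : Prop := ∀ (aux_input_format : String), Dom_get_aux_input_channel aux_input_format → Pre_get_aux_input_channel aux_input_format → Spec_get_aux_input_channel aux_input_format (get_aux_input_channel aux_input_format)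

-- ===== LEMMAS AND PROOFS =====

def pvStep (acc : Int) (c : Char) : Int :=
  if pvLower c = 'b' then acc
  else if pvLower c = 'o' then acc + 2
  else if pvLower c = 'n' then acc + 3
  else if pvLower c = '-' then acc
  else if pvLower c = 'g' then acc + 1
  else acc

def pvSum (cs : List Char) : Int :=
  2 * (PySem.List.count (cs.map pvLower) 'o' : Int)
    + 3 * (PySem.List.count (cs.map pvLower) 'n' : Int)
    + (PySem.List.count (cs.map pvLower) 'g' : Int)

lemma pvLoop (cs : List Char) :
    (∀ c ∈ cs, c ∈ (['o','n','g','-','O','N','G'] : List Char)) →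
    ∀ acc : Int, cs.foldl pvStep acc = acc + pvSum cs := by
  induction cs with
  | nil => intro _ acc; simp [pvSum, PySem.List.count_eq]
  | cons c cs ih =>
    intro h acc
    have hc : c ∈ (['o','n','g','-','O','N','G'] : List Char) := h c (by simp)
    have htail := ih (fun x hx => h x (List.mem_cons_of_mem _ hx))
    fin_cases hc <;>
      simp [List.foldl_cons, htail, pvStep, pvSum, PySem.List.count_eq, pvLower] <;> ring

-- ===== VERDICT (by name: the statement is the Claim_ definition above) =====
theorem get_aux_input_channel_spec : Claim_equal_get_aux_input_channel := by
  intro s _ hpre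
  unfold Spec_get_aux_input_channel get_aux_input_channel get_aux_input_channel_alt
  have h : ∀ c ∈ s.toList, c ∈ (['o','n','g','-','O','N','G'] : List Char) := by
    intro c hc
    have := hpre
    unfold Pre_get_aux_input_channel at this
    simpa using List.all_eq_true.mp this c hc
  simpa [pvSum] using pvLoop s.toList h 0
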